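-- pv_equiv track=rewrite | github.com/Jakub-Woszczek/Introduction-to-Computer-Science---AGH-Course | Zestaw 5 - recursion/5.Cięcie z slicem i BIT.py | decimal
-- ===== SOURCE A (Python) =====
-- def binary_to_decimal(binary_list):
--     binary_string = ''.join(map(str, binary_list))  # Konwersja listy na string binarny
--     decimal_number = int(binary_string, 2)  # Konwersja stringa binarnego na liczbę dziesiętną
--     return decimal_number
--
-- def decimal(binary):
--     binary = binary_to_decimal(binary)
--     decimal = 0
--     power = 0
--     while binary > 0:
--         last_digit = binary % 10
--         decimal += last_digit * (2 ** power)
--         binary //= 10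
--         power += 1
--     return decimal
-- ===== SOURCE B (Python) =====
-- def decimal(binary):
--     n = int(''.join(map(str, binary)), 2)
--     result = 0
--     for ch in str(n):
--         result = result * 2 + int(ch)
--     return result
-- ===== Notes on version B (the rewrite author's own statement) =====
-- stated objective: simpler
-- what changed: The LSB-first modulo/power loop over the intermediate integer (three state variables: digit, power, 2**power term) is replaced by Horner's method over the decimal-digit string most-significant-first with a single accumulator; stage 1 (int(''.join(map(str, binary)), 2)) is kept identical.
-- outside the precondition, e.g. on decimal([-1, 0]): A returns 0, B raises ValueError
import Mathlib
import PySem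

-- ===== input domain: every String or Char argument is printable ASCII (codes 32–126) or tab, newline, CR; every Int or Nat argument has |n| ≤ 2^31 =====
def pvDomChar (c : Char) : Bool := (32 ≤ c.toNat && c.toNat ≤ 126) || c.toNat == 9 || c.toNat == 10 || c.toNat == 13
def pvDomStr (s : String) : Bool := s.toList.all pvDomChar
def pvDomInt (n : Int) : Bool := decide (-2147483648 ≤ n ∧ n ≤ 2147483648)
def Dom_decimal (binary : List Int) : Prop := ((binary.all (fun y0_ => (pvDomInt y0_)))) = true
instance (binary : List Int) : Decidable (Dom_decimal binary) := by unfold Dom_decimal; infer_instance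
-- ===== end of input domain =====

-- B replaces A's LSB-first modulo/power loop by Horner's method over the decimal digits
-- most-significant-first (objective: simpler — one accumulator instead of digit/power/2**power).

-- ===== PORT A =====
-- A's while-loop; `power` stays ≥ 0 throughout the run, so Python's `2 ** power`
-- is ported exactly as `2 ^ power.toNat`.
def decimalLoop (binary dec power : Int) : Int :=
  if h : 0 < binary then
    decimalLoop (PySem.Int.floordiv binary 10)
      (dec + (PySem.Int.mod binary 10) * 2 ^ power.toNat) (power + 1)
  else dec
termination_by binary.toNat
decreasing_by
  simp only [PySem.Int.floordiv, Int.fdiv_eq_ediv]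
  omega

def decimal (binary : List Int) : Int :=
  -- binary_to_decimal: int(''.join(map(str, binary)), 2); ValueError (none) is excluded by Pre_
  match PySem.Int.ofStrBase? (PySem.Str.join "" (binary.map PySem.Int.toStr)) 2 with
  | none => 0
  | some n => decimalLoop n 0 0

-- ===== PORT B =====
-- Horner step: result * 2 + int(ch); under Pre_ every ch is a decimal digit, so
-- int(ch) succeeds and `.getD 0` is never the default.
def hornerStep (result : Int) (ch : Char) : Int :=
  result * 2 + (PySem.Int.ofChars? [ch]).getD 0

def decimal_alt (binary : List Int) : Int :=
  match PySem.Int.ofStrBase? (PySem.Str.join "" (binary.map PySem.Int.toStr)) 2 with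
  | none => 0
  | some n => (PySem.Int.toChars n).foldl hornerStep 0

-- ===== PRECONDITION & SPEC =====
-- Pre_ excludes inputs where stage 1 (int(s, 2)) raises ValueError: the empty list and
-- lists whose concatenated decimal representation contains a character other than '0'/'1'.
-- It thereby also excludes lists whose join parses as a NEGATIVE binary literal (first
-- element negative, e.g. [-1, 0]): there A returns 0 while B's Horner pass over str(n)
-- hits the '-' sign and raises ValueError.
def Pre_decimal (binary : List Int) : Prop :=
  binary ≠ [] ∧
    (PySem.Chars.join [] (binary.map PySem.Int.toChars)).all
      (fun c => c = '0' || c = '1') = true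
instance (binary : List Int) : Decidable (Pre_decimal binary) := by
  unfold Pre_decimal; infer_instance

def pvWitness_decimal : List Int := [1, 0, 1, 1]

def Spec_decimal (binary : List Int) (out : Int) : Prop := out = decimal_alt binary
instance (binary : List Int) (out : Int) : Decidable (Spec_decimal binary out) := by
  unfold Spec_decimal; infer_instance

-- ===== CLAIM (what is proved, stated in full; the proofs are below) =====
def Claim_equal_decimal : Prop :=
  ∀ (binary : List Int), Dom_decimal binary → Pre_decimal binary →
    Spec_decimal binary (decimal binary)

-- ===== LEMMAS AND PROOFS =====

-- the common value both loops compute: the decimal digits of m read as binary, LSB-first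
def gN (n : ℕ) : Int :=
  if h : n = 0 then 0 else ((n % 10 : ℕ) : Int) + 2 * gN (n / 10)
termination_by n
decreasing_by exact Nat.div_lt_self (Nat.pos_of_ne_zero h) (by norm_num)

lemma gN_zero : gN 0 = 0 := by rw [gN]; simp

lemma gN_ne {m : ℕ} (hm : m ≠ 0) :
    gN m = ((m % 10 : ℕ) : Int) + 2 * gN (m / 10) := by
  rw [gN, dif_neg hm]

lemma floordiv_natCast_ten (m : ℕ) :
    PySem.Int.floordiv (m : Int) 10 = ((m / 10 : ℕ) : Int) := by
  simp [PySem.Int.floordiv, Int.fdiv_eq_ediv]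

lemma mod_natCast_ten (m : ℕ) :
    PySem.Int.mod (m : Int) 10 = ((m % 10 : ℕ) : Int) := by
  simp [PySem.Int.mod, Int.fmod_eq_emod]

lemma decimalLoop_eq_gN (m : ℕ) :
    ∀ dec power : Int, 0 ≤ power →
      decimalLoop (m : Int) dec power = dec + 2 ^ power.toNat * gN m := by
  induction m using Nat.strong_induction_on with
  | _ m ih =>
    intro dec power hp
    rw [decimalLoop]
    by_cases hm : m = 0
    · subst hm; rw [gN_zero]; simp
    · have hpos : (0 : Int) < (m : Int) := by exact_mod_cast Nat.pos_of_ne_zero hm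
      rw [dif_pos hpos, floordiv_natCast_ten, mod_natCast_ten,
        ih (m / 10) (Nat.div_lt_self (Nat.pos_of_ne_zero hm) (by norm_num)) _ _
          (by omega)]
      have htn : (power + 1).toNat = power.toNat + 1 := by omega
      rw [htn, gN_ne hm]
      ring

-- decimal-digit characters of m, most significant first (the value of `str(m)`)
def decChars (n : ℕ) : List Char :=
  if n < 10 then [Nat.digitChar n]
  else decChars (n / 10) ++ [Nat.digitChar (n % 10)]
termination_by n
decreasing_by exact Nat.div_lt_self (by omega) (by norm_num)

lemma decChars_lt {n : ℕ} (h : n < 10) : decChars n = [Nat.digitChar n] := by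
  rw [decChars, if_pos h]

lemma decChars_ge {n : ℕ} (h : ¬ n < 10) :
    decChars n = decChars (n / 10) ++ [Nat.digitChar (n % 10)] := by
  rw [decChars, if_neg h]

lemma toDigitsCore_eq_decChars :
    ∀ (f n : ℕ), n < 10 ^ (f + 1) → ∀ acc : List Char,
      Nat.toDigitsCore 10 (f + 1) n acc = decChars n ++ acc := by
  intro f
  induction f with
  | zero =>
    intro n hn acc
    have h10 : n < 10 := by simpa using hn
    have : n / 10 = 0 := Nat.div_eq_of_lt h10
    simp [Nat.toDigitsCore, this, decChars_lt h10, Nat.mod_eq_of_lt h10]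
  | succ f ih =>
    intro n hn acc
    rw [Nat.toDigitsCore]
    by_cases h : n / 10 = 0
    · have h10 : n < 10 := Nat.lt_of_div_eq_zero (by norm_num) h
      simp [h, decChars_lt h10, Nat.mod_eq_of_lt h10]
    · have h10 : ¬ n < 10 := fun hlt => h (Nat.div_eq_of_lt hlt)
      rw [if_neg h, ih (n / 10) (by rw [pow_succ] at hn; omega)]
      rw [decChars_ge h10]
      simp

lemma toDigits_eq_decChars (m : ℕ) : Nat.toDigits 10 m = decChars m := by
  have hm : m < 10 ^ (m + 1) := by
    calc m < 10 ^ m := Nat.lt_pow_self (by norm_num)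
    _ ≤ 10 ^ (m + 1) := Nat.pow_le_pow_right (by norm_num) (by omega)
  simpa using toDigitsCore_eq_decChars m m hm []

lemma digit_val (d : ℕ) (hd : d < 10) :
    (PySem.Int.ofChars? [Nat.digitChar d]).getD 0 = (d : Int) := by
  interval_cases d <;> decide

lemma foldl_decChars (m : ℕ) :
    ∀ a : Int, List.foldl hornerStep a (decChars m) =
      a * 2 ^ (decChars m).length + gN m := by
  induction m using Nat.strong_induction_on with
  | _ m ih =>
    intro a
    by_cases h10 : m < 10
    · rw [decChars_lt h10]
      simp only [List.foldl, List.length_singleton, hornerStep,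
        digit_val m h10]
      by_cases hm : m = 0
      · subst hm; rw [gN_zero]; simp
      · rw [gN_ne hm, Nat.div_eq_of_lt h10, gN_zero, Nat.mod_eq_of_lt h10]
        ring
    · have hm : m ≠ 0 := by omega
      rw [decChars_ge h10, List.foldl_append,
        ih (m / 10) (Nat.div_lt_self (by omega) (by norm_num))]
      simp only [List.foldl, hornerStep, digit_val (m % 10) (Nat.mod_lt _ (by norm_num)),
        List.length_append, List.length_singleton]
      rw [gN_ne hm]
      ring

lemma parse_nonneg (cs : List Char) (h : ∀ c ∈ cs, c = '0' ∨ c = '1') (m : Int)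
    (hp : PySem.Int.ofCharsBase? cs 2 = some m) : 0 ≤ m := by
  rw [PySem.Int.ofCharsBase?] at hp
  rw [if_neg (by norm_num)] at hp
  dsimp only at hp
  split at hp
  · exact absurd hp (by simp)
  · rw [if_neg (fun hc => absurd hc.1 (by norm_num))] at hp
    split at hp
    · -- the sign match returned true: the stripped string starts with '-'
      rename_i heq
      exfalso
      have hmem : '-' ∈ cs := by
        have hm2 : '-' ∈ (List.dropWhile PySem.Int.isIntSpace
            (List.dropWhile PySem.Int.isIntSpace cs).reverse).reverse := by
          rw [heq]; exact List.mem_cons_self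
        rw [List.mem_reverse] at hm2
        have hm3 := List.Sublist.mem hm2 (List.dropWhile_sublist _)
        rw [List.mem_reverse] at hm3
        exact List.Sublist.mem hm3 (List.dropWhile_sublist _)
      rcases h '-' hmem with h' | h' <;> simp at h'
    · simp at hp
      omega
    · simp at hp
      omega

-- ===== VERDICT (by name: the statement is the Claim_ definition above) =====
theorem decimal_spec : Claim_equal_decimal := by
  intro binary hDom hPre
  unfold Spec_decimal decimal decimal_alt
  set s := PySem.Str.join "" (binary.map PySem.Int.toStr) with hs
  cases hp : PySem.Int.ofStrBase? s 2 with
  | none => rfl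
  | some n =>
    have hn : 0 ≤ n := by
      rw [PySem.Int.ofStrBase?] at hp
      refine parse_nonneg _ ?_ _ hp
      have hlist : s.toList = PySem.Chars.join [] (binary.map PySem.Int.toChars) := by
        rw [hs, PySem.Str.toList_join]
        simp only [List.map_map]
        congr 1
        exact List.map_congr_left (fun x _ => PySem.Int.toList_toStr x)
      intro c hc
      rw [hlist] at hc
      have := List.all_eq_true.mp hPre.2 c hc
      simpa using this
    obtain ⟨m, rfl⟩ : ∃ m : ℕ, n = (m : Int) := ⟨n.toNat, (Int.toNat_of_nonneg hn).symm⟩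
    have hA : decimalLoop (m : Int) 0 0 = gN m := by
      rw [decimalLoop_eq_gN m 0 0 le_rfl]; simp
    have hchars : PySem.Int.toChars (m : Int) = decChars m := by
      rw [PySem.Int.toChars, if_neg (not_lt.mpr (Int.natCast_nonneg m)),
        Int.toNat_natCast, toDigits_eq_decChars]
    dsimp only
    rw [hA, hchars, foldl_decChars]
    simp
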